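-- pv_equiv track=rewrite | github.com/mbollmann/levenshtein | conv_norm.py | revert_conversion
-- ===== SOURCE A (Python) =====
-- BEGIN_TOKEN = "__BEGIN__"
--
-- def revert_conversion(data, epsilon):
--     input_token, output_token = None, None
--     for (lhs, rhs) in data:
--         if lhs == BEGIN_TOKEN:
--             if input_token:
--                 yield (input_token, output_token)
--             input_token = ""
--             output_token = rhs if rhs != epsilon else ""
--         else:
--             input_token += lhs
--             if rhs != epsilon:
--                 output_token += rhs
--     if input_token:
--         yield (input_token, output_token)
-- ===== SOURCE B (Python) =====
-- BEGIN_TOKEN = "__BEGIN__"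
--
-- def revert_conversion(data, epsilon):
--     # Phase 1: collect each group's lhs/rhs pieces, one (ins, outs) pair per
--     # BEGIN row.  Phase 2: assemble and emit the token pairs.
--     groups = []
--     for lhs, rhs in data:
--         if lhs == BEGIN_TOKEN:
--             groups.append(([], [] if rhs == epsilon else [rhs]))
--         else:
--             ins, outs = groups[-1]
--             ins.append(lhs)
--             if rhs != epsilon:
--                 outs.append(rhs)
--     for ins, outs in groups:
--         input_token = "".join(ins)
--         if input_token:
--             yield (input_token, "".join(outs))
-- ===== Notes on version B (the rewrite author's own statement) =====
-- stated objective: alternative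
-- what changed: Replaces A's rolling string accumulators with interleaved yields by a two-phase algorithm: first collect each BEGIN-delimited group's lhs/rhs pieces into lists, then join and emit the token pairs; Pre_ excludes inputs whose first row is not a BEGIN row, on which both implementations raise.
import Mathlib
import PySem

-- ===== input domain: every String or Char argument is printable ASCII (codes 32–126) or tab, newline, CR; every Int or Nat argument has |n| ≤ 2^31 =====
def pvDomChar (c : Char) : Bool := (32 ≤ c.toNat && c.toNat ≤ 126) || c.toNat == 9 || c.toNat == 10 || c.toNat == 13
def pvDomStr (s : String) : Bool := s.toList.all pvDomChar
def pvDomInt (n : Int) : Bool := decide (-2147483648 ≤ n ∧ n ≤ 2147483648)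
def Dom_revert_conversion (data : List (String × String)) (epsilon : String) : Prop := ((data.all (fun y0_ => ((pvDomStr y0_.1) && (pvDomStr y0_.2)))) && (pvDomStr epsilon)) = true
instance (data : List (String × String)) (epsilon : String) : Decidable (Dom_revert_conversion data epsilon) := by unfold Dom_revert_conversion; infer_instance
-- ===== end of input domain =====

-- B collects each BEGIN-delimited group's pieces into lists first and joins/emits
-- them in a second phase, instead of A's rolling string accumulators with
-- interleaved yields (objective: alternative decomposition, same cost).

-- ===== PORT A =====
-- Python truthiness of `input_token` (None or str): None and "" are falsy
def pvTruthy : Option String → Bool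
  | some s => s ≠ ""
  | none => false

-- the loop body of A; the `+=` on a None accumulator raises TypeError in Python —
-- those inputs are excluded by Pre_, so the `getD ""` there is never reached inside Pre_
def stepA (epsilon : String) (st : Option String × Option String × List (String × String))
    (pr : String × String) : Option String × Option String × List (String × String) :=
  if pr.1 == "__BEGIN__" then
    let acc := if pvTruthy st.1 then st.2.2 ++ [((st.1).getD "", (st.2.1).getD "")] else st.2.2
    (some "", some (if pr.2 != epsilon then pr.2 else ""), acc)
  else
    (some ((st.1).getD "" ++ pr.1),
     if pr.2 != epsilon then some ((st.2.1).getD "" ++ pr.2) else st.2.1,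
     st.2.2)

-- the trailing `if input_token: yield (input_token, output_token)`
def finishA (st : Option String × Option String × List (String × String)) : List (String × String) :=
  if pvTruthy st.1 then st.2.2 ++ [((st.1).getD "", (st.2.1).getD "")] else st.2.2

def revert_conversion (data : List (String × String)) (epsilon : String) : List (String × String) :=
  finishA (data.foldl (stepA epsilon) (none, none, []))

-- ===== PORT B =====
-- phase 1 loop body: a BEGIN row opens a new (ins, outs) group, any other row
-- appends to the last group; `groups[-1]` on an empty list raises IndexError in
-- Python — excluded by Pre_, so the `getD ([], [])` is never reached inside Pre_
def stepB (epsilon : String) (gs : List (List String × List String))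
    (pr : String × String) : List (List String × List String) :=
  if pr.1 == "__BEGIN__" then
    gs ++ [([], if pr.2 == epsilon then [] else [pr.2])]
  else
    let g := (gs.getLast?).getD ([], [])
    gs.dropLast ++ [(g.1 ++ [pr.1], if pr.2 != epsilon then g.2 ++ [pr.2] else g.2)]

-- phase 2 loop: join each group's pieces and yield the pair when the input is nonempty
def emitB : List (List String × List String) → List (String × String)
  | [] => []
  | g :: gs =>
    (if String.join g.1 ≠ "" then [(String.join g.1, String.join g.2)] else []) ++ emitB gs

def revert_conversion_alt (data : List (String × String)) (epsilon : String) : List (String × String) :=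
  emitB (data.foldl (stepB epsilon) [])

-- ===== PRECONDITION & SPEC =====
-- Pre_ excludes exactly the inputs where A raises TypeError: a nonempty `data`
-- whose first row is not a BEGIN row (`None += str` before any group is opened;
-- B raises IndexError there).
def Pre_revert_conversion (data : List (String × String)) (epsilon : String) : Prop :=
  data.head?.all (fun p => p.1 == "__BEGIN__") = true
instance (data : List (String × String)) (epsilon : String) : Decidable (Pre_revert_conversion data epsilon) := by unfold Pre_revert_conversion; infer_instance

def pvWitness_revert_conversion : (List (String × String)) × String :=
  ([("__BEGIN__", "x"), ("a", "b"), ("c", "e")], "e")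

def Spec_revert_conversion (data : List (String × String)) (epsilon : String) (out : List (String × String)) : Prop := out = revert_conversion_alt data epsilon
instance (data : List (String × String)) (epsilon : String) (out : List (String × String)) : Decidable (Spec_revert_conversion data epsilon out) := by unfold Spec_revert_conversion; infer_instance

-- ===== CLAIM (what is proved, stated in full; the proofs are below) =====
def Claim_equal_revert_conversion : Prop := ∀ (data : List (String × String)) (epsilon : String), Dom_revert_conversion data epsilon → Pre_revert_conversion data epsilon → Spec_revert_conversion data epsilon (revert_conversion data epsilon)

-- ===== LEMMAS AND PROOFS =====

-- "".join over a list with one more piece at the end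
theorem join_concat (xs : List String) (s : String) :
    String.join (xs ++ [s]) = String.join xs ++ s := by
  simp [String.join, List.foldl_append]

-- emitB distributes over append
theorem emitB_append (xs ys : List (List String × List String)) :
    emitB (xs ++ ys) = emitB xs ++ emitB ys := by
  induction xs with
  | nil => simp [emitB]
  | cons g gs ih => simp [emitB, ih]

-- A's loop run from an open group agrees with B's grouping loop run from the
-- matching group list: A's accumulators are the joins of the open group's pieces
-- and A's already-yielded pairs are the emission of the closed groups
theorem loop_eq (ε : String) :
    ∀ (rows : List (String × String)) (closed : List (List String × List String))
      (ins outs : List String),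
      finishA (rows.foldl (stepA ε) (some (String.join ins), some (String.join outs), emitB closed))
        = emitB (rows.foldl (stepB ε) (closed ++ [(ins, outs)])) := by
  intro rows
  induction rows with
  | nil =>
    intro closed ins outs
    simp only [List.foldl, finishA, pvTruthy, emitB_append, emitB]
    split_ifs <;> simp_all
  | cons hd tl ih =>
    intro closed ins outs
    obtain ⟨l, r⟩ := hd
    by_cases hb : l = "__BEGIN__"
    · subst hb
      simp only [List.foldl, stepA, stepB, BEq.rfl, reduceIte, pvTruthy, Option.getD_some]
      have hflush :
          (if (String.join ins ≠ "" : Bool) then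
              emitB closed ++ [(String.join ins, String.join outs)] else emitB closed)
            = emitB (closed ++ [(ins, outs)]) := by
        simp only [emitB_append, emitB, List.append_nil]
        split_ifs <;> simp_all
      rw [hflush]
      have hnew : (if (r != ε) = true then r else "")
          = String.join (if r == ε then [] else [r]) := by
        by_cases he : r = ε <;> simp [he, String.join]
      rw [hnew]
      have := ih (closed ++ [(ins, outs)]) [] (if r == ε then [] else [r])
      simpa [String.join, List.append_assoc] using this
    · have hbq : (l == "__BEGIN__") = false := by simpa using hb
      simp only [List.foldl, stepA, stepB, hbq, Bool.false_eq_true, if_false,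
        Option.getD_some, List.getLast?_concat, List.dropLast_concat]
      rw [show (if (r != ε) = true then some (String.join outs ++ r) else some (String.join outs))
            = some (String.join (if (r != ε) = true then outs ++ [r] else outs)) from by
          split <;> simp [join_concat]]
      rw [show String.join ins ++ l = String.join (ins ++ [l]) from (join_concat ins l).symm]
      have := ih closed (ins ++ [l]) (if (r != ε) = true then outs ++ [r] else outs)
      rw [this]

-- ===== VERDICT =====
theorem revert_conversion_spec : Claim_equal_revert_conversion := by
  intro data epsilon _ hpre
  unfold Spec_revert_conversion revert_conversion revert_conversion_alt
  cases data with
  | nil => simp [finishA, pvTruthy, emitB]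
  | cons hd tl =>
    obtain ⟨l, r⟩ := hd
    have hl : l = "__BEGIN__" := by simpa [Pre_revert_conversion] using hpre
    subst hl
    simp only [List.foldl, stepA, stepB, BEq.rfl, reduceIte, pvTruthy]
    have := loop_eq epsilon tl [] [] (if r == epsilon then [] else [r])
    simp only [emitB, List.nil_append] at this
    rw [show (if (r != epsilon) = true then r else "")
          = String.join (if r == epsilon then [] else [r]) from by
        by_cases he : r = epsilon <;> simp [he, String.join]]
    simpa [String.join] using this
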